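-- pv_equiv track=rewrite | github.com/tcalmant/ipopo | pelix/ldapfilter.py | unescape_LDAP
-- ===== SOURCE A (Python) =====
-- ESCAPE_CHARACTER = "\\"
--
-- def unescape_LDAP(ldap_string):
--     # type: (str) -> str
--     # pylint: disable=C0103
--     """
--     Unespaces an LDAP string
--
--     :param ldap_string: The string to unescape
--     :return: The unprotected string
--     """
--     if ldap_string is None:
--         return None
--
--     if ESCAPE_CHARACTER not in ldap_string:
--         # No need to loop
--         return ldap_string
--
--     escaped = False
--     result = ""
--
--     for character in ldap_string:
--         if not escaped and character == ESCAPE_CHARACTER: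
--             # Escape character found
--             escaped = True
--         else:
--             # Copy the character
--             escaped = False
--             result += character
--
--     return result
-- ===== SOURCE B (Python) =====
-- ESCAPE_CHARACTER = "\\"
--
-- def unescape_LDAP(ldap_string):
--     """
--     Unescapes an LDAP string by splitting on the escape character once and
--     reassembling the parts (staged passes instead of a per-character scan).
--     """
--     if ldap_string is None:
--         return None
--
--     parts = ldap_string.split(ESCAPE_CHARACTER)
--     if len(parts) == 1:
--         # No escape character at all
--         return ldap_string
--
--     # parts[0] is literal text; each later part was preceded by a backslash.
--     # A non-empty part: the backslash just escaped its first character -> keep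
--     # the part as is.  An empty part: the backslash escaped the NEXT backslash
--     # -> emit a backslash and keep the following part literally (skip it).
--     # A trailing empty part with nothing after it is a lone backslash: dropped.
--     out = [parts[0]]
--     i = 1
--     n = len(parts)
--     while i < n:
--         part = parts[i]
--         if part:
--             out.append(part)
--             i += 1
--         elif i + 1 < n:
--             out.append(ESCAPE_CHARACTER)
--             out.append(parts[i + 1])
--             i += 2
--         else:
--             i += 1
--     return "".join(out)
-- ===== Notes on version B (the rewrite author's own statement) =====
-- stated objective: alternative
-- what changed: Instead of A's per-character boolean-flag state machine, B splits the string on the escape character once and reassembles the parts (non-empty part kept verbatim, empty part = escaped backslash fusing the next part, trailing empty part = dropped lone backslash).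
import Mathlib
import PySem

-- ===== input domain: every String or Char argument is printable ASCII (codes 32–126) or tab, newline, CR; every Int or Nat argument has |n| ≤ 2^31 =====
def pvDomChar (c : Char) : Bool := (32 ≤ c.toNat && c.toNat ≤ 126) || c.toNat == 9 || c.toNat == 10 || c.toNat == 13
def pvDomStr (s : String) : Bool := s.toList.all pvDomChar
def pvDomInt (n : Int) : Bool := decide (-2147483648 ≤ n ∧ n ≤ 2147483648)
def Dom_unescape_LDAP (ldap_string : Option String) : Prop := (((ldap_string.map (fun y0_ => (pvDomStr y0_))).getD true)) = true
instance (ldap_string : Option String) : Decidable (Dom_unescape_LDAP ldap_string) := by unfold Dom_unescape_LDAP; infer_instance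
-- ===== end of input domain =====

-- B replaces A's per-character boolean-flag state machine by a split-on-backslash pass
-- followed by a reassembly of the parts; return values are identical on all inputs.

-- ===== PORT A =====
-- one step of A's for-loop; state = (escaped, result), result as List Char (result += character)
def pvStepA (st : Bool × List Char) (character : Char) : Bool × List Char :=
  if !st.1 && character == '\\' then (true, st.2) else (false, st.2 ++ [character])

def unescape_LDAP (ldap_string : Option String) : Option String :=
  match ldap_string with
  | none => none
  | some s =>
    if ('\\' ∈ s.toList) then
      some (String.ofList (s.toList.foldl pvStepA (false, [])).2)
    else
      -- No need to loop
      some s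

-- ===== PORT B =====
-- ldap_string.split('\\') on the character list
def pvSplit : List Char → List (List Char)
  | [] => [[]]
  | c :: r =>
    if c = '\\' then [] :: pvSplit r
    else
      match pvSplit r with
      | [] => [[c]]
      | p :: ps => (c :: p) :: ps

-- B's while loop over the parts after parts[0]: non-empty part kept verbatim,
-- empty part = escaped backslash fusing the next part, trailing empty part dropped.
def pvProc : List (List Char) → List Char
  | [] => []
  | [] :: [] => []
  | [] :: q :: rest' => '\\' :: (q ++ pvProc rest')
  | (c :: p) :: rest => (c :: p) ++ pvProc rest

def unescape_LDAP_alt (ldap_string : Option String) : Option String :=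
  match ldap_string with
  | none => none
  | some s =>
    let parts := pvSplit s.toList
    if parts.length = 1 then
      -- No escape character at all
      some s
    else
      some (String.ofList (parts.headD [] ++ pvProc parts.tail))

-- ===== PRECONDITION & SPEC =====
def Spec_unescape_LDAP (ldap_string : Option String) (out : Option String) : Prop := out = unescape_LDAP_alt ldap_string
instance (ldap_string : Option String) (out : Option String) : Decidable (Spec_unescape_LDAP ldap_string out) := by unfold Spec_unescape_LDAP; infer_instance

-- ===== CLAIM (what is proved, stated in full; the proofs are below) =====
def Claim_equal_unescape_LDAP : Prop := ∀ (ldap_string : Option String), Dom_unescape_LDAP ldap_string → Spec_unescape_LDAP ldap_string (unescape_LDAP ldap_string)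

-- ===== LEMMAS AND PROOFS =====

theorem pvSplit_ne_nil (l : List Char) : pvSplit l ≠ [] := by
  cases l with
  | nil => simp [pvSplit]
  | cons c r =>
    simp only [pvSplit]
    split
    · simp
    · cases h : pvSplit r <;> simp

-- B's reassembly, as a function of the raw character list: F = from scratch, G = in the
-- middle of an escape (A's escaped = true)
def pvF (l : List Char) : List Char := (pvSplit l).headD [] ++ pvProc (pvSplit l).tail
def pvG (l : List Char) : List Char := pvProc (pvSplit l)

-- A's loop from state (esc, acc) produces acc ++ (pvG / pvF) of the remaining characters.
theorem pvLoop_eq : ∀ (l : List Char) (esc : Bool) (acc : List Char),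
    (l.foldl pvStepA (esc, acc)).2 = acc ++ (if esc then pvG l else pvF l) := by
  intro l
  induction l with
  | nil =>
    intro esc acc
    cases esc <;> simp [pvF, pvG, pvSplit, pvProc]
  | cons c rest ih =>
    intro esc acc
    by_cases hc : c = '\\'
    · subst hc
      cases esc with
      | true =>
        -- escaped: copy the backslash
        simp only [List.foldl, pvStepA, Bool.not_true, Bool.false_and,
          if_neg Bool.false_ne_true]
        rw [ih false (acc ++ ['\\'])]
        have hne := pvSplit_ne_nil rest
        simp only [if_neg Bool.false_ne_true, pvG, pvF, pvSplit]
        cases h : pvSplit rest with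
        | nil => exact absurd h hne
        | cons p ps => simp [pvProc]
      | false =>
        -- not escaped: escape character found
        have hstep : List.foldl pvStepA (false, acc) ('\\' :: rest)
            = List.foldl pvStepA (true, acc) rest := by
          simp [List.foldl, pvStepA]
        rw [hstep, ih true acc]
        simp [pvF, pvG, pvSplit]
    · have hb : (c == '\\') = false := beq_false_of_ne hc
      cases esc with
      | true =>
        simp only [List.foldl, pvStepA, Bool.not_true, Bool.false_and,
          if_neg Bool.false_ne_true]
        rw [ih false (acc ++ [c])]
        have hne := pvSplit_ne_nil rest
        simp only [if_neg Bool.false_ne_true, pvG, pvF, pvSplit, if_neg hc]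
        cases h : pvSplit rest with
        | nil => exact absurd h hne
        | cons p ps => simp [pvProc]
      | false =>
        simp only [List.foldl, pvStepA, hb, Bool.not_false, Bool.true_and,
          if_neg Bool.false_ne_true]
        rw [ih false (acc ++ [c])]
        have hne := pvSplit_ne_nil rest
        simp only [if_neg Bool.false_ne_true, pvF, pvSplit, if_neg hc]
        cases h : pvSplit rest with
        | nil => exact absurd h hne
        | cons p ps => simp

-- the length-1 test of B coincides with A's membership test
theorem pvSplit_len_one (l : List Char) : (pvSplit l).length = 1 ↔ '\\' ∉ l := by
  induction l with
  | nil => simp [pvSplit]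
  | cons c r ih =>
    by_cases hc : c = '\\'
    · subst hc
      have hne := pvSplit_ne_nil r
      have hlen : 0 < (pvSplit r).length := List.length_pos_of_ne_nil hne
      have hsp : pvSplit ('\\' :: r) = [] :: pvSplit r := by simp [pvSplit]
      rw [hsp, List.length_cons]
      constructor
      · intro h; exfalso; omega
      · intro h; exact absurd (by simp : ('\\' : Char) ∈ '\\' :: r) h
    · have hne := pvSplit_ne_nil r
      cases h : pvSplit r with
      | nil => exact absurd h hne
      | cons p ps =>
        simp only [pvSplit, if_neg hc, h, List.length_cons, List.mem_cons]
        rw [h, List.length_cons] at ih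
        constructor
        · intro hl hm
          rcases hm with h1 | h2
          · exact hc h1.symm
          · exact (ih.mp hl) h2
        · intro hm
          exact ih.mpr (fun hx => hm (Or.inr hx))

-- on a string with no backslash, pvF is the identity (not needed: B returns s directly there)

-- ===== VERDICT (by name: the statement is the Claim_ definition above) =====
theorem unescape_LDAP_spec : Claim_equal_unescape_LDAP := by
  intro ldap_string _
  unfold Spec_unescape_LDAP unescape_LDAP unescape_LDAP_alt
  cases ldap_string with
  | none => rfl
  | some s =>
    simp only
    by_cases h : '\\' ∈ s.toList
    · have hlen : ¬ (pvSplit s.toList).length = 1 := by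
        intro hl; exact (pvSplit_len_one s.toList).mp hl h
      rw [if_pos h, if_neg hlen, pvLoop_eq s.toList false []]
      simp [pvF]
    · have hlen : (pvSplit s.toList).length = 1 := (pvSplit_len_one s.toList).mpr h
      rw [if_neg h, if_pos hlen]
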